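-- pv_equiv track=rewrite | github.com/vendora-b2b/e-commerce-system | src/main/resources/db/seed/ingest_csv_to_db.py | parse_category_path
-- ===== SOURCE A (Python) =====
-- def parse_category_path(category_ids_str):
--     """Parse category IDs path like '0:1085666:1007040' and return leaf category ID"""
--     if not category_ids_str or category_ids_str == '':
--         return None
--     parts = category_ids_str.split(':')
--     # Get the last non-zero ID
--     for p in reversed(parts):
--         if p and p != '0':
--             try:
--                 return int(p)
--             except:
--                 continue
--     return None
-- ===== SOURCE B (Python) =====
-- def _to_int(p):
--     """Parse a single path part: None for empty/'0'/unparseable, else its int value."""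
--     if not p or p == '0':
--         return None
--     try:
--         return int(p)
--     except ValueError:
--         return None
--
--
-- def parse_category_path(category_ids_str):
--     """Parse category IDs path like '0:1085666:1007040' and return leaf category ID"""
--     if not category_ids_str:
--         return None
--     vals = [v for v in map(_to_int, category_ids_str.split(':')) if v is not None]
--     return vals[-1] if vals else None
-- ===== Notes on version B (the rewrite author's own statement) =====
-- stated objective: alternative
-- what changed: Replaces A's reversed scan with early return/continue by a staged pipeline: map each part through a total parse helper, filter out failures, and take the last surviving value.
import Mathlib
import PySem

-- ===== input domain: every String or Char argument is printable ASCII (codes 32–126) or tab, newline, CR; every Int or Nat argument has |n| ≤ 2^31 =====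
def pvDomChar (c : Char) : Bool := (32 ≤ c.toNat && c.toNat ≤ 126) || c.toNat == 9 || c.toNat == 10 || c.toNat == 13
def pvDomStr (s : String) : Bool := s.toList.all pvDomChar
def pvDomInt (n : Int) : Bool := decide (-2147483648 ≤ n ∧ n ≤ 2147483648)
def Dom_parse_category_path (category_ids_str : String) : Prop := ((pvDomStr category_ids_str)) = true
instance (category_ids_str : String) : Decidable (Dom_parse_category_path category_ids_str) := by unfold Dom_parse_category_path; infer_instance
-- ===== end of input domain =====

-- B replaces A's reversed early-return scan by a staged pipeline: parse every part
-- with a total helper, filter out the failures, take the last value (alternative decomposition).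


-- ===== PORT A =====
-- 'for p in reversed(parts): …' with early return / continue, as structural recursion
def pcpGoA : List String → Option Int
  | [] => none
  | p :: rest =>
    if p ≠ "" ∧ p ≠ "0" then
      match PySem.Int.ofStr? p with
      | some v => some v          -- return int(p)
      | none => pcpGoA rest       -- except: continue
    else pcpGoA rest

def parse_category_path (category_ids_str : String) : Option Int :=
  if category_ids_str = "" then none
  else pcpGoA ((PySem.Str.split? category_ids_str ":").getD []).reverse

-- ===== PORT B =====
-- _to_int: total per-part parser (None for empty / '0' / unparseable)
def pcpToInt (p : String) : Option Int :=
  if p = "" ∨ p = "0" then none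
  else PySem.Int.ofStr? p

-- map + filter-out-None = filterMap; 'vals[-1] if vals else None' = getLast?
def parse_category_path_alt (category_ids_str : String) : Option Int :=
  if category_ids_str = "" then none
  else (((PySem.Str.split? category_ids_str ":").getD []).filterMap pcpToInt).getLast?

-- ===== PRECONDITION & SPEC =====
def Spec_parse_category_path (category_ids_str : String) (out : Option Int) : Prop := out = parse_category_path_alt category_ids_str
instance (category_ids_str : String) (out : Option Int) : Decidable (Spec_parse_category_path category_ids_str out) := by unfold Spec_parse_category_path; infer_instance

-- ===== CLAIM (what is proved, stated in full; the proofs are below) =====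
def Claim_equal_parse_category_path : Prop := ∀ (category_ids_str : String), Dom_parse_category_path category_ids_str → Spec_parse_category_path category_ids_str (parse_category_path category_ids_str)

-- ===== LEMMAS AND PROOFS =====

-- A's scan over a list returns the first successful parse: the head of the filterMap.
theorem pcpGoA_eq_head (l : List String) :
    pcpGoA l = (l.filterMap pcpToInt).head? := by
  induction l with
  | nil => rfl
  | cons p rest ih =>
    simp only [pcpGoA, List.filterMap_cons]
    by_cases h : p = "" ∨ p = "0"
    · rw [if_neg (by tauto), show pcpToInt p = none from by simp only [pcpToInt, if_pos h]]
      exact ih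
    · rw [if_pos (by tauto), show pcpToInt p = PySem.Int.ofStr? p from by
        simp only [pcpToInt, if_neg h]]
      cases hv : PySem.Int.ofStr? p
      · exact ih
      · rfl

-- ===== VERDICT (by name: the statement is the Claim_ definition above) =====
theorem parse_category_path_spec : Claim_equal_parse_category_path := by
  intro s _
  unfold Spec_parse_category_path parse_category_path parse_category_path_alt
  split_ifs with h
  · rfl
  · rw [pcpGoA_eq_head, List.filterMap_reverse, List.head?_reverse]
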